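-- pv_equiv track=rewrite | github.com/BuzzingTaz/IC-Project-S21 | P2/utils.py | MDD
-- ===== SOURCE A (Python) =====
-- def HammingDistance(c1, c2):
--
--     distance = 0
--
--     for i in range(len(c1)):
--
--         if c1[i] != c2[i]:
--             distance += 1
--
--     return distance
--
-- def MDD(ybar,code):
--
--     minHammingDistance = 99999
--     minset = [] # Set of all codewords in the code that have the minimum Hamming Distance compared to ybar
--
--     for codeword in code:
--
--         distance = HammingDistance(ybar,codeword)
--
--         if distance < minHammingDistance:
--             minHammingDistance = distance
--
--     for codeword in code:
--
--         dist = HammingDistance(ybar, codeword)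
--
--         if dist == minHammingDistance:
--             minset.append(codeword)
--
--     return minset
-- ===== SOURCE B (Python) =====
-- def MDD(ybar, code):
--     # Single online pass: one distance per codeword, resetting the candidate set
--     # whenever a strictly smaller distance appears (best starts at the function's
--     # 99999 distance cap, which also covers an empty code).
--     best = 99999
--     minset = []
--     for cw in code:
--         d = sum(a != b for a, b in zip(ybar, cw))
--         if d < best:
--             best = d
--             minset = [cw]
--         elif d == best:
--             minset.append(cw)
--     return minset
-- ===== Notes on version B (the rewrite author's own statement) =====
-- stated objective: simpler
-- what changed: A makes two staged scans over the code, recomputing every index-based Hamming distance in each scan (first to fold the minimum, then to collect matches); B is a single online pass that computes each distance once via zip and maintains (best, minset) together, resetting minset whenever a strictly smaller distance appears.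
import Mathlib
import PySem

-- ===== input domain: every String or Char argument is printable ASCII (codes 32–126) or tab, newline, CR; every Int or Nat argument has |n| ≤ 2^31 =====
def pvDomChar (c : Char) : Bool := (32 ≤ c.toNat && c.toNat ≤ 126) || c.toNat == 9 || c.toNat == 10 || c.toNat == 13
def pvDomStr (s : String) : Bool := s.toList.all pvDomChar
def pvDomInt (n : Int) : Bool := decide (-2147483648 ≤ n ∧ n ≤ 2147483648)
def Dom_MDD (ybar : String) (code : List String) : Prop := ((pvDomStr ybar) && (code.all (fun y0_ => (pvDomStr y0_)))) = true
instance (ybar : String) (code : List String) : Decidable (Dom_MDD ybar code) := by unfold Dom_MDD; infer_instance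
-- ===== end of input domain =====

-- B replaces A's two staged scans (a min fold, then a recomputed-distance collecting loop)
-- by one online pass that computes each distance once via zip and resets the candidate set
-- whenever a strictly smaller distance appears; the return value is proved identical.

-- ===== PORT A =====
-- HammingDistance(c1, c2): pyGetD is exact here because Pre_MDD guarantees every index
-- i < len c1 is also in range for c2 (Python raises IndexError otherwise, excluded by Pre_).
def pyHamming (c1 c2 : List Char) : Int :=
  (PySem.List.pyRange 0 (c1.length : Int) 1).foldl
    (fun d i => if PySem.List.pyGetD c1 i ' ' ≠ PySem.List.pyGetD c2 i ' ' then d + 1 else d) 0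

def MDD (ybar : String) (code : List String) : List String :=
  let minH : Int := code.foldl
    (fun m cw => let dist := pyHamming ybar.toList cw.toList
                 if dist < m then dist else m) 99999
  code.foldl
    (fun acc cw => let dist := pyHamming ybar.toList cw.toList
                   if dist = minH then acc ++ [cw] else acc) []

-- ===== PORT B =====
-- sum(a != b for a, b in zip(ybar, cw)) : a count over the zipped pairs
def hamZip (c1 c2 : List Char) : Int :=
  ((c1.zip c2).countP (fun p => p.1 ≠ p.2) : Nat)

def MDD_alt (ybar : String) (code : List String) : List String :=
  (code.foldl
    (fun (st : Int × List String) cw =>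
      let d := hamZip ybar.toList cw.toList
      if d < st.1 then (d, [cw])
      else if d = st.1 then (st.1, st.2 ++ [cw])
      else st)
    (99999, [])).2

-- ===== PRECONDITION & SPEC =====
-- Pre_ excludes exactly the inputs where HammingDistance(ybar, cw) raises IndexError
-- (a codeword shorter than ybar); A returns on every admitted input.
def Pre_MDD (ybar : String) (code : List String) : Prop :=
  ∀ cw ∈ code, ybar.toList.length ≤ cw.toList.length
instance (ybar : String) (code : List String) : Decidable (Pre_MDD ybar code) := by
  unfold Pre_MDD; infer_instance
def pvWitness_MDD : String × List String := ("ab", ["ab", "cd", "abc"])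

def Spec_MDD (ybar : String) (code : List String) (out : List String) : Prop := out = MDD_alt ybar code
instance (ybar : String) (code : List String) (out : List String) : Decidable (Spec_MDD ybar code out) := by unfold Spec_MDD; infer_instance

-- ===== CLAIM (what is proved, stated in full; the proofs are below) =====
def Claim_equal_MDD : Prop := ∀ (ybar : String) (code : List String), Dom_MDD ybar code → Pre_MDD ybar code → Spec_MDD ybar code (MDD ybar code)

-- ===== LEMMAS AND PROOFS =====

-- A's per-codeword distance equals B's zip count when c2 is at least as long as c1.
theorem pyHamming_eq_hamZip (c1 c2 : List Char) (h : c1.length ≤ c2.length) :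
    pyHamming c1 c2 = hamZip c1 c2 := by
  unfold pyHamming hamZip
  have hlen : (c1.zip c2).length = c1.length := by simp [List.length_zip]; omega
  have hcongr :
      (PySem.List.pyRange 0 (c1.length : Int) 1).foldl
        (fun (d : Int) i => if PySem.List.pyGetD c1 i ' ' ≠ PySem.List.pyGetD c2 i ' ' then d + 1 else d) 0
      = (PySem.List.pyRange 0 (((c1.zip c2).length : Nat) : Int) 1).foldl
        (fun d i => if (PySem.List.pyGetD (c1.zip c2) i (' ', ' ')).1 ≠ (PySem.List.pyGetD (c1.zip c2) i (' ', ' ')).2 then d + 1 else d) (0 : Int) := by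
    rw [hlen]
    apply PySem.List.foldl_congr_mem
    intro acc i hi
    rw [PySem.List.mem_pyRange_one] at hi
    obtain ⟨h0, hlt⟩ := hi
    obtain ⟨k, rfl⟩ := Int.eq_ofNat_of_zero_le h0
    have hk1 : k < c1.length := by exact_mod_cast hlt
    have hk2 : k < c2.length := lt_of_lt_of_le hk1 h
    simp [PySem.List.pyGetD_natCast, hk1, hk2, List.getElem_zip]
  refine hcongr.trans ?_
  rw [PySem.List.foldl_pyRange_zero_pyGetD' (c1.zip c2) (' ', ' ')
        (fun (acc : Int) (p : Char × Char) => if p.1 ≠ p.2 then acc + 1 else acc) 0,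
      PySem.List.foldl_ite_add_one]
  simp

theorem foldl_min_le (t : List Int) : ∀ b : Int, t.foldl min b ≤ b := by
  induction t with
  | nil => intro b; exact le_rfl
  | cons x s ih => intro b; exact le_trans (ih (min b x)) (min_le_left b x)

-- The single online pass equals (running min of the distances, filter of the codewords attaining it).
theorem loop_char (d : String → Int) (l : List String) : ∀ (b : Int) (s : List String),
    l.foldl
      (fun (st : Int × List String) cw =>
        if d cw < st.1 then (d cw, [cw])
        else if d cw = st.1 then (st.1, st.2 ++ [cw])
        else st) (b, s)
    = ((l.map d).foldl min b,
       (if (l.map d).foldl min b < b then [] else s)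
         ++ l.filter (fun cw => d cw = (l.map d).foldl min b)) := by
  induction l with
  | nil => intro b s; simp
  | cons x t ih =>
      intro b s
      have hle : ∀ c : Int, (t.map d).foldl min c ≤ c := fun c => foldl_min_le (t.map d) c
      simp only [List.foldl_cons, List.map_cons, List.filter_cons]
      by_cases h1 : d x < b
      · rw [if_pos h1, ih (d x) [x]]
        have hmin : min b (d x) = d x := by omega
        simp only [hmin]
        have hM := hle (d x)
        rcases lt_or_eq_of_le hM with hlt | heq
        · have hne : ¬ (d x = (t.map d).foldl min (d x)) := by omega
          simp [hlt, lt_trans hlt h1, hne]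
        · have h3 : ¬ ((t.map d).foldl min (d x) < d x) := by omega
          have h4 : (t.map d).foldl min (d x) < b := by omega
          have h5 : decide (d x = (t.map d).foldl min (d x)) = true :=
            decide_eq_true heq.symm
          simp [h3, h4, h5]
      · rw [if_neg h1]
        by_cases h2 : d x = b
        · rw [if_pos h2, ih b (s ++ [x])]
          have hmin : min b (d x) = b := by omega
          simp only [hmin]
          have hM := hle b
          rcases lt_or_eq_of_le hM with hlt | heq
          · have hne : ¬ (d x = (t.map d).foldl min b) := by omega
            simp [hlt, hne]
          · have heqd : d x = (t.map d).foldl min b := by omega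
            have hnlt : ¬ ((t.map d).foldl min b < b) := by omega
            simp [hnlt, heqd, List.append_assoc]
        · rw [if_neg h2, ih b s]
          have hmin : min b (d x) = b := by omega
          simp only [hmin]
          have hne : ¬ (d x = (t.map d).foldl min b) := by
            have := hle b; omega
          simp [hne]

theorem MDD_eq (ybar : String) (code : List String) (hpre : Pre_MDD ybar code) :
    MDD ybar code = MDD_alt ybar code := by
  have hd : ∀ cw ∈ code, pyHamming ybar.toList cw.toList = hamZip ybar.toList cw.toList :=
    fun cw hcw => pyHamming_eq_hamZip _ _ (hpre cw hcw)
  -- zeta-reduced statement of MDD = MDD_alt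
  show code.foldl
      (fun (acc : List String) (cw : String) =>
        if pyHamming ybar.toList cw.toList
            = code.foldl (fun (m : Int) (cw : String) => if pyHamming ybar.toList cw.toList < m
                then pyHamming ybar.toList cw.toList else m) 99999
          then acc ++ [cw] else acc) []
    = (code.foldl
        (fun (st : Int × List String) cw =>
          if hamZip ybar.toList cw.toList < st.1 then (hamZip ybar.toList cw.toList, [cw])
          else if hamZip ybar.toList cw.toList = st.1 then (st.1, st.2 ++ [cw])
          else st) ((99999 : Int), ([] : List String))).2
  -- A's first loop equals the min fold over B's distance table
  have hminA : code.foldl (fun (m : Int) (cw : String) => if pyHamming ybar.toList cw.toList < m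
        then pyHamming ybar.toList cw.toList else m) 99999
      = (code.map (fun (cw : String) => hamZip ybar.toList cw.toList)).foldl min 99999 := by
    have h1 := PySem.List.foldl_congr_mem (l := code) (init := (99999 : Int))
      (f := fun (m : Int) (cw : String) => if pyHamming ybar.toList cw.toList < m
              then pyHamming ybar.toList cw.toList else m)
      (g := fun (m : Int) (cw : String) => min m (hamZip ybar.toList cw.toList))
      (by intro acc x hx
          simp only [hd x hx, min_def]
          split_ifs <;> omega)
    exact h1.trans (List.foldl_map (f := fun (cw : String) => hamZip ybar.toList cw.toList) (g := min)).symm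
  -- A's second loop, with the distance rewritten and turned into a filter
  have hA : code.foldl
      (fun (acc : List String) (cw : String) =>
        if pyHamming ybar.toList cw.toList
            = code.foldl (fun (m : Int) (cw : String) => if pyHamming ybar.toList cw.toList < m
                then pyHamming ybar.toList cw.toList else m) 99999
          then acc ++ [cw] else acc) []
      = code.filter (fun (cw : String) => hamZip ybar.toList cw.toList
          = (code.map (fun (cw : String) => hamZip ybar.toList cw.toList)).foldl min 99999) := by
    have h2 := PySem.List.foldl_congr_mem (l := code) (init := ([] : List String))
      (f := fun (acc : List String) (cw : String) =>
        if pyHamming ybar.toList cw.toList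
            = code.foldl (fun (m : Int) (cw : String) => if pyHamming ybar.toList cw.toList < m
                then pyHamming ybar.toList cw.toList else m) 99999
          then acc ++ [cw] else acc)
      (g := fun (acc : List String) (cw : String) =>
        if hamZip ybar.toList cw.toList
            = (code.map (fun (cw : String) => hamZip ybar.toList cw.toList)).foldl min 99999
          then acc ++ [cw] else acc)
      (by intro acc x hx
          simp only [hd x hx, hminA])
    exact h2.trans (by rw [PySem.List.foldl_append_ite_eq_filter]; simp)
  rw [hA, loop_char (fun (cw : String) => hamZip ybar.toList cw.toList) code 99999 []]
  split <;> simp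

-- ===== VERDICT (by name: the statement is the Claim_ definition above) =====
theorem MDD_spec : Claim_equal_MDD := by
  intro ybar code _ hpre
  exact MDD_eq ybar code hpre
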